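-- pv_equiv track=rewrite | github.com/leonardoPiano/VideoBrain-ThumbnailExtractor | VideoBrain/yolo_thumbnail_processor.py | selectClasses
-- ===== SOURCE A (Python) =====
-- def selectClasses(imgClass):
--
--      food=['bottle','wine glass','cup','fork','knife','spoon','bowl','banana','apple',
--                      'sandwich','orange','broccoli','carrot','hot dog','pizza','donut','cake','person']
--      tech=['tvmonitor' ,'laptop', 'mouse' ,'remote', 'keyboard',
--                         'cell', 'phone' ,'microwave','oven' ,'toaster']
--      animal=['bird','cat','dog','horse','sheep','cow','elephant','bear',
--                         'zebra','giraffe']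
--      car=['car','motorbike','truck','bus']
--
--      for c in food:
--         if c==imgClass:
--             return 'food'
--      for c in tech:
--             if c==imgClass:
--                 return 'tech'
--      for c in animal:
--             if c==imgClass:
--                 return 'animal'
--      for c in car:
--             if c==imgClass:
--                 return 'car'
--
--
--      return ''
-- ===== SOURCE B (Python) =====
-- _NAMES = ['bottle', 'wine glass', 'cup', 'fork', 'knife', 'spoon', 'bowl',
--           'banana', 'apple', 'sandwich', 'orange', 'broccoli', 'carrot',
--           'hot dog', 'pizza', 'donut', 'cake', 'person',
--           'tvmonitor', 'laptop', 'mouse', 'remote', 'keyboard',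
--           'cell', 'phone', 'microwave', 'oven', 'toaster',
--           'bird', 'cat', 'dog', 'horse', 'sheep', 'cow', 'elephant',
--           'bear', 'zebra', 'giraffe',
--           'car', 'motorbike', 'truck', 'bus']
--
--
-- def selectClasses(imgClass):
--     # position of the class in one flat ordered table, then the category is
--     # decided purely arithmetically from where that position falls
--     try:
--         i = _NAMES.index(imgClass)
--     except ValueError:
--         return ''
--     return 'food' if i < 18 else 'tech' if i < 28 else 'animal' if i < 38 else 'car'
-- ===== Notes on version B (the rewrite author's own statement) =====
-- stated objective: alternative
-- what changed: Replaces the four per-category membership loops with one flat ordered table of all 42 class names: a single .index search gives the position, and the category label is computed arithmetically from which of the boundary ranges [0,18), [18,28), [28,38), [38,42) that position falls in, with the empty-string default when the name is absent.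
import Mathlib
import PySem

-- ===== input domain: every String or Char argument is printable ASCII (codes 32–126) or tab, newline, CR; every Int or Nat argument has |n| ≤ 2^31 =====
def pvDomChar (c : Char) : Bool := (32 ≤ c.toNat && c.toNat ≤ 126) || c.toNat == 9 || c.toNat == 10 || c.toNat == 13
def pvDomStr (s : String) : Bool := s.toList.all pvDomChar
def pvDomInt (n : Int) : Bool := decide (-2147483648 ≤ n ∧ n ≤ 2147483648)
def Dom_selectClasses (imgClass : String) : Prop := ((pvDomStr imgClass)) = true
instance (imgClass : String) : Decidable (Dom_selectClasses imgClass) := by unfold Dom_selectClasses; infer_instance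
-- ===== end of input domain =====

-- B replaces the four per-category membership loops by a single position search in one flat
-- ordered table of all 42 class names plus threshold arithmetic on the position (objective: alternative).

-- ===== PORT A =====
-- 'for c in xs: if c == imgClass: return <label>' — true iff some element equals imgClass, scanned in order
def pvLoopHit : List String → String → Bool
  | [], _ => false
  | c :: rest, img => if c == img then true else pvLoopHit rest img

def selectClasses (imgClass : String) : String :=
  let food := ["bottle", "wine glass", "cup", "fork", "knife", "spoon", "bowl", "banana", "apple",
               "sandwich", "orange", "broccoli", "carrot", "hot dog", "pizza", "donut", "cake", "person"]
  let tech := ["tvmonitor", "laptop", "mouse", "remote", "keyboard",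
               "cell", "phone", "microwave", "oven", "toaster"]
  let animal := ["bird", "cat", "dog", "horse", "sheep", "cow", "elephant", "bear",
                 "zebra", "giraffe"]
  let car := ["car", "motorbike", "truck", "bus"]
  if pvLoopHit food imgClass then "food"
  else if pvLoopHit tech imgClass then "tech"
  else if pvLoopHit animal imgClass then "animal"
  else if pvLoopHit car imgClass then "car"
  else ""

-- ===== PORT B =====
-- Source B's _NAMES: the one flat ordered table of all 42 class names
def pvNames : List String :=
  ["bottle", "wine glass", "cup", "fork", "knife", "spoon", "bowl",
   "banana", "apple", "sandwich", "orange", "broccoli", "carrot",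
   "hot dog", "pizza", "donut", "cake", "person",
   "tvmonitor", "laptop", "mouse", "remote", "keyboard",
   "cell", "phone", "microwave", "oven", "toaster",
   "bird", "cat", "dog", "horse", "sheep", "cow", "elephant",
   "bear", "zebra", "giraffe",
   "car", "motorbike", "truck", "bus"]

-- _NAMES.index(imgClass) inside try/except (none = ValueError → ''), then the threshold chain
def selectClasses_alt (imgClass : String) : String :=
  match PySem.List.index? pvNames imgClass with
  | none => ""
  | some i => if i < 18 then "food" else if i < 28 then "tech" else if i < 38 then "animal" else "car"

-- ===== PRECONDITION & SPEC =====
def Spec_selectClasses (imgClass : String) (out : String) : Prop := out = selectClasses_alt imgClass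
instance (imgClass : String) (out : String) : Decidable (Spec_selectClasses imgClass out) := by unfold Spec_selectClasses; infer_instance

-- ===== CLAIM (what is proved, stated in full; the proofs are below) =====
def Claim_equal_selectClasses : Prop := ∀ (imgClass : String), Dom_selectClasses imgClass → Spec_selectClasses imgClass (selectClasses imgClass)

-- ===== LEMMAS AND PROOFS =====

-- A's loop hits iff the scanned list contains imgClass
theorem pvLoopHit_iff_mem (l : List String) (img : String) :
    pvLoopHit l img = true ↔ img ∈ l := by
  induction l with
  | nil => simp [pvLoopHit]
  | cons c t ih =>
    simp only [pvLoopHit, List.mem_cons]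
    by_cases h : c = img
    · simp [h]
    · have hb : (c == img) = false := by simp [h]
      simp only [hb, Bool.false_eq_true, if_false, ih]
      constructor
      · exact Or.inr
      · rintro (e | m)
        · exact absurd e.symm h
        · exact m

-- position search in an appended table, when the sought name is not in the front block
theorem pvIdx_append_not_mem (l t : List String) (v : String) (h : v ∉ l) :
    PySem.List.index? (l ++ t) v = (PySem.List.index? t v).map (· + l.length) := by
  simp only [PySem.List.index?_eq_idxOf?]
  induction l with
  | nil => simp
  | cons a l ih =>
    simp only [List.mem_cons, not_or] at h
    have hne : ¬ (a == v) = true := by simp; exact fun e => h.1 e.symm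
    simp only [List.cons_append, List.idxOf?_cons, hne, ih h.2, Option.map_map]
    have hfe : ((fun x => x + 1) ∘ fun x => x + l.length) = (fun x => x + (a :: l).length) := by
      funext x; simp; omega
    simp [hfe]

-- ===== VERDICT (by name: the statement is the Claim_ definition above) =====
theorem selectClasses_spec : Claim_equal_selectClasses := by
  intro imgClass _
  show selectClasses imgClass = selectClasses_alt imgClass
  simp only [selectClasses, selectClasses_alt]
  have hsplit : pvNames =
      ["bottle", "wine glass", "cup", "fork", "knife", "spoon", "bowl", "banana", "apple",
       "sandwich", "orange", "broccoli", "carrot", "hot dog", "pizza", "donut", "cake", "person"] ++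
      (["tvmonitor", "laptop", "mouse", "remote", "keyboard",
        "cell", "phone", "microwave", "oven", "toaster"] ++
       (["bird", "cat", "dog", "horse", "sheep", "cow", "elephant", "bear",
         "zebra", "giraffe"] ++
        ["car", "motorbike", "truck", "bus"])) := rfl
  by_cases h1 : pvLoopHit ["bottle", "wine glass", "cup", "fork", "knife", "spoon", "bowl",
      "banana", "apple", "sandwich", "orange", "broccoli", "carrot", "hot dog", "pizza",
      "donut", "cake", "person"] imgClass = true
  · -- found in the food block: position < 18
    have hmem := (pvLoopHit_iff_mem _ _).mp h1
    rw [hsplit, PySem.List.index?_append_of_mem _ hmem]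
    have hs : (PySem.List.index? _ imgClass).isSome := (PySem.List.index?_isSome_iff _ _).mpr hmem
    obtain ⟨k, hk⟩ := Option.isSome_iff_exists.mp hs
    obtain ⟨hlt, -, -⟩ := PySem.List.getElem_of_index?_eq_some hk
    simp only [h1, if_true, hk]
    simp at hlt
    simp [hlt]
  · have hn1 := (not_iff_not.mpr (pvLoopHit_iff_mem _ imgClass)).mp h1
    by_cases h2 : pvLoopHit ["tvmonitor", "laptop", "mouse", "remote", "keyboard",
        "cell", "phone", "microwave", "oven", "toaster"] imgClass = true
    · have hmem := (pvLoopHit_iff_mem _ _).mp h2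
      rw [hsplit, pvIdx_append_not_mem _ _ _ hn1, PySem.List.index?_append_of_mem _ hmem]
      have hs : (PySem.List.index? _ imgClass).isSome := (PySem.List.index?_isSome_iff _ _).mpr hmem
      obtain ⟨k, hk⟩ := Option.isSome_iff_exists.mp hs
      obtain ⟨hlt, -, -⟩ := PySem.List.getElem_of_index?_eq_some hk
      simp only [h1, h2, if_true, hk, Option.map_some]
      simp at hlt
      have : ¬ (k + 18 < 18) := by omega
      have h28 : k + 18 < 28 := by omega
      simp [List.length, this, h28]
    · have hn2 := (not_iff_not.mpr (pvLoopHit_iff_mem _ imgClass)).mp h2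
      by_cases h3 : pvLoopHit ["bird", "cat", "dog", "horse", "sheep", "cow", "elephant",
          "bear", "zebra", "giraffe"] imgClass = true
      · have hmem := (pvLoopHit_iff_mem _ _).mp h3
        rw [hsplit, pvIdx_append_not_mem _ _ _ hn1, pvIdx_append_not_mem _ _ _ hn2,
          PySem.List.index?_append_of_mem _ hmem]
        have hs : (PySem.List.index? _ imgClass).isSome := (PySem.List.index?_isSome_iff _ _).mpr hmem
        obtain ⟨k, hk⟩ := Option.isSome_iff_exists.mp hs
        obtain ⟨hlt, -, -⟩ := PySem.List.getElem_of_index?_eq_some hk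
        simp only [h1, h2, h3, if_true, hk, Option.map_some]
        simp at hlt
        have ha : ¬ (k + 10 + 18 < 18) := by omega
        have hb : ¬ (k + 10 + 18 < 28) := by omega
        have hc : k + 10 + 18 < 38 := by omega
        simp [List.length, ha, hb, hc]
      · have hn3 := (not_iff_not.mpr (pvLoopHit_iff_mem _ imgClass)).mp h3
        by_cases h4 : pvLoopHit ["car", "motorbike", "truck", "bus"] imgClass = true
        · have hmem := (pvLoopHit_iff_mem _ _).mp h4
          rw [hsplit, pvIdx_append_not_mem _ _ _ hn1, pvIdx_append_not_mem _ _ _ hn2,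
            pvIdx_append_not_mem _ _ _ hn3]
          have hs : (PySem.List.index? _ imgClass).isSome := (PySem.List.index?_isSome_iff _ _).mpr hmem
          obtain ⟨k, hk⟩ := Option.isSome_iff_exists.mp hs
          simp only [h1, h2, h3, h4, if_true, hk, Option.map_some]
          have ha : ¬ (k + 10 + 10 + 18 < 18) := by omega
          have hb : ¬ (k + 10 + 10 + 18 < 28) := by omega
          have hc : ¬ (k + 10 + 10 + 18 < 38) := by omega
          simp [List.length, ha, hb, hc]
        · have hn4 := (not_iff_not.mpr (pvLoopHit_iff_mem _ imgClass)).mp h4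
          have hnone : PySem.List.index? pvNames imgClass = none := by
            rw [PySem.List.index?_eq_none_iff]
            rw [hsplit]
            simp only [List.mem_append, not_or]
            exact ⟨hn1, hn2, hn3, hn4⟩
          rw [PySem.List.index?_eq_idxOf?] at hnone
          simp [h1, h2, h3, h4, hnone]
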